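-- pv_equiv track=rewrite | github.com/ThomasTrepanier/log6307-final-project | data/interim/stackoverflow/src/python/26_66.py | uniqueIndexes
-- ===== SOURCE A (Python) =====
-- def uniqueIndexes(l):
--     seen = set()
--     res = []
--     for i, n in enumerate(l):
--         if n not in seen:
--             res.append(i)
--             seen.add(n)
--     return res
-- ===== SOURCE B (Python) =====
-- def uniqueIndexes(l):
--     first = {}
--     for i, n in reversed(list(enumerate(l))):
--         first[n] = i
--     return sorted(first.values())
-- ===== Notes on version B (the rewrite author's own statement) =====
-- stated objective: alternative
-- what changed: Replaces the forward test-and-skip pass with a maintained seen-set by a backwards overwrite pass into a dict (last write wins gives each value's first index, no membership test) followed by sorting the collected indices.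
import Mathlib
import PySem

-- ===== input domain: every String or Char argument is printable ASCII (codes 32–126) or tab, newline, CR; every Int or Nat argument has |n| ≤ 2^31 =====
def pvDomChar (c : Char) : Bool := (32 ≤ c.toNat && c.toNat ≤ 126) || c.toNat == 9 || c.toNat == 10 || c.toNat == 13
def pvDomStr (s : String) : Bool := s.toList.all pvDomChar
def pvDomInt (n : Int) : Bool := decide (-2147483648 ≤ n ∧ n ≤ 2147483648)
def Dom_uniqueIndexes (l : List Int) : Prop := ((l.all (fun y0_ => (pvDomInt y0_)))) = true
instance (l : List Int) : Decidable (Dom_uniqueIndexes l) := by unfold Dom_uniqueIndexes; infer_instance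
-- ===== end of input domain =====

-- B replaces A's forward test-and-skip pass (seen-set) by a backwards unconditional
-- dict overwrite (last write wins = first index) followed by sorting the values.

-- ===== PORT A =====
-- the for loop: for i, n in enumerate(l): if n not in seen: res.append(i); seen.add(n)
def uniqueIndexesLoop (seen : PySem.Set Int) (res : List Int) (i : Int) : List Int → List Int
  | [] => res
  | n :: rest =>
    if ¬ PySem.Set.contains seen n then
      uniqueIndexesLoop (PySem.Set.add seen n) (res ++ [i]) (i + 1) rest
    else
      uniqueIndexesLoop seen res (i + 1) rest

-- seen = set(); res = []; <loop>; return res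
def uniqueIndexes (l : List Int) : List Int :=
  uniqueIndexesLoop PySem.Set.empty [] 0 l

-- ===== PORT B =====
-- first = {}; for i, n in reversed(list(enumerate(l))): first[n] = i; return sorted(first.values())
def uniqueIndexes_alt (l : List Int) : List Int :=
  let first := (PySem.List.enumerate l).reverse.foldl
    (fun d p => d.insert p.2 p.1) PySem.Dict.empty
  PySem.List.sorted (PySem.Dict.values first) (fun x => x) false

-- ===== PRECONDITION & SPEC =====
def Spec_uniqueIndexes (l : List Int) (out : List Int) : Prop := out = uniqueIndexes_alt l
instance (l : List Int) (out : List Int) : Decidable (Spec_uniqueIndexes l out) := by unfold Spec_uniqueIndexes; infer_instance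

-- ===== CLAIM (what is proved, stated in full; the proofs are below) =====
def Claim_equal_uniqueIndexes : Prop := ∀ (l : List Int), Dom_uniqueIndexes l → Spec_uniqueIndexes l (uniqueIndexes l)

-- ===== LEMMAS AND PROOFS =====

-- B's dict build as a function of the pair list
def pvBuild (ps : List (Int × Int)) : PySem.Dict Int Int :=
  ps.reverse.foldl (fun d p => d.insert p.2 p.1) PySem.Dict.empty

theorem pvBuild_cons (p : Int × Int) (ps : List (Int × Int)) :
    pvBuild (p :: ps) = (pvBuild ps).insert p.2 p.1 := by
  simp [pvBuild, List.reverse_cons, List.foldl_append]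

-- lookup in B's dict = first occurrence index (offset by s)
theorem pv_get?_build (l : List Int) : ∀ (s n : Int),
    (pvBuild (PySem.List.enumerate l s)).get? n
      = (PySem.List.index? l n).map (fun k => s + (k : Int)) := by
  induction l with
  | nil => intro s n; simp [pvBuild, PySem.List.enumerate_nil, PySem.List.index?]
  | cons x rest ih =>
    intro s n
    rw [PySem.List.enumerate_cons, pvBuild_cons]
    by_cases hnx : n = x
    · subst hnx
      rw [PySem.Dict.get?_insert_self, PySem.List.index?_cons_self]
      simp
    · rw [PySem.Dict.get?_insert_of_ne _ _ hnx, ih (s + 1) n,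
        PySem.List.index?_cons_of_ne _ (fun h => hnx h.symm)]
      cases h : PySem.List.index? rest n with
      | none => simp
      | some k => simp; omega

theorem pv_nodup_keys_build (ps : List (Int × Int)) : (pvBuild ps).keys.Nodup := by
  induction ps with
  | nil => exact PySem.Dict.nodup_keys_empty
  | cons p ps ih => rw [pvBuild_cons]; exact PySem.Dict.nodup_keys_insert _ _ _ ih

theorem pv_mem_keys_build (l : List Int) (n : Int) :
    n ∈ (pvBuild (PySem.List.enumerate l 0)).keys ↔ n ∈ l := by
  have hg := pv_get?_build l 0 n
  constructor
  · intro h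
    by_contra hn
    have hnone : PySem.List.index? l n = none := by
      cases hidx : PySem.List.index? l n with
      | none => rfl
      | some k =>
        exact absurd ((PySem.List.index?_isSome_iff l n).mp (by rw [hidx]; rfl)) hn
    rw [hnone] at hg
    exact (PySem.Dict.get?_eq_none_iff_not_mem_keys _ _).mp (by rw [hg]; rfl) h
  · intro h
    obtain ⟨k, hk⟩ := Option.isSome_iff_exists.mp ((PySem.List.index?_isSome_iff l n).mpr h)
    by_contra hn
    have hnone := (PySem.Dict.get?_eq_none_iff_not_mem_keys _ _).mpr hn
    rw [hg, hk] at hnone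
    simp at hnone

-- first occurrence of x in pre ++ x :: suf when x ∉ pre is at index pre.length
theorem pv_index?_concat_of_not_mem (x : Int) (pre suf : List Int) (h : x ∉ pre) :
    PySem.List.index? (pre ++ x :: suf) x = some pre.length := by
  induction pre with
  | nil => simpa using PySem.List.index?_cons_self x suf
  | cons a t ih =>
    have hax : a ≠ x := by intro he; exact h (by simp [he])
    have ht : x ∉ t := fun hm => h (List.mem_cons_of_mem _ hm)
    rw [List.cons_append, PySem.List.index?_cons_of_ne _ hax, ih ht]
    simp

-- A's loop appends a strictly increasing tail of indices ≥ i
theorem pv_loop_bounds : ∀ (suf : List Int) (seen : PySem.Set Int) (res : List Int) (i : Int),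
    ∃ t, uniqueIndexesLoop seen res i suf = res ++ t ∧ t.Pairwise (· < ·) ∧ ∀ x ∈ t, i ≤ x := by
  intro suf
  induction suf with
  | nil => intro seen res i; exact ⟨[], by simp [uniqueIndexesLoop]⟩
  | cons n rest ih =>
    intro seen res i
    by_cases h : PySem.Set.contains seen n = true
    · rw [show uniqueIndexesLoop seen res i (n :: rest)
            = uniqueIndexesLoop seen res (i + 1) rest from by
        rw [uniqueIndexesLoop, if_neg (not_not_intro h)]]
      obtain ⟨t, ht, hp, hb⟩ := ih seen res (i + 1)
      exact ⟨t, ht, hp, fun x hx => by have := hb x hx; omega⟩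
    · rw [show uniqueIndexesLoop seen res i (n :: rest)
            = uniqueIndexesLoop (PySem.Set.add seen n) (res ++ [i]) (i + 1) rest from by
        rw [uniqueIndexesLoop, if_pos h]]
      obtain ⟨t, ht, hp, hb⟩ := ih (PySem.Set.add seen n) (res ++ [i]) (i + 1)
      refine ⟨i :: t, ?_, ?_, ?_⟩
      · rw [ht, List.append_assoc]; rfl
      · exact List.pairwise_cons.mpr ⟨fun x hx => by have := hb x hx; omega, hp⟩
      · intro x hx
        rcases List.mem_cons.mp hx with h1 | h1
        · omega
        · have := hb x h1; omega

-- loop invariant (A = stateless first-occurrence selection):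
theorem pv_main (L : List Int) : ∀ (suf pre res : List Int), L = pre ++ suf →
    uniqueIndexesLoop (PySem.Set.ofList pre) res (pre.length : Int) suf
    = res ++ (PySem.List.enumerate suf (pre.length : Int)).filterMap
        (fun p => if (PySem.List.index? L p.2).map (fun k => (k : Int)) = some p.1 then some p.1 else none) := by
  intro suf
  induction suf with
  | nil => intro pre res _; simp [uniqueIndexesLoop, PySem.List.enumerate_nil]
  | cons x suf' ih =>
    intro pre res hL
    rw [PySem.List.enumerate_cons]
    have hadd : PySem.Set.add (PySem.Set.ofList pre) x = PySem.Set.ofList (pre ++ [x]) := by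
      simp [PySem.Set.ofList_eq_foldl, List.foldl_append]
    have hlen : ((pre ++ [x]).length : Int) = (pre.length : Int) + 1 := by simp
    by_cases hx : x ∈ pre
    · have hc : PySem.Set.contains (PySem.Set.ofList pre) x = true := by
        simp [PySem.Set.mem_ofList, hx]
      have hidx : PySem.List.index? L x = PySem.List.index? pre x := by
        rw [hL]; exact PySem.List.index?_append_of_mem _ hx
      obtain ⟨k, hk⟩ := Option.isSome_iff_exists.mp ((PySem.List.index?_isSome_iff pre x).mpr hx)
      obtain ⟨hklt, -, -⟩ := PySem.List.getElem_of_index?_eq_some hk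
      have hcond : ¬ ((PySem.List.index? L x).map (fun k => (k : Int)) = some ((pre.length : Int), x).1) := by
        rw [hidx, hk]
        intro he
        have : k = pre.length := by simpa using he
        omega
      rw [show List.filterMap
            (fun p => if (PySem.List.index? L p.2).map (fun k => (k : Int)) = some p.1 then some p.1 else none)
            (((pre.length : Int), x) :: PySem.List.enumerate suf' ((pre.length : Int) + 1))
          = List.filterMap
            (fun p => if (PySem.List.index? L p.2).map (fun k => (k : Int)) = some p.1 then some p.1 else none)
            (PySem.List.enumerate suf' ((pre.length : Int) + 1)) from
        List.filterMap_cons_none (by exact if_neg hcond)]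
      rw [show uniqueIndexesLoop (PySem.Set.ofList pre) res (pre.length : Int) (x :: suf')
            = uniqueIndexesLoop (PySem.Set.ofList pre) res ((pre.length : Int) + 1) suf' from by
        rw [uniqueIndexesLoop, if_neg (not_not_intro hc)]]
      have hofl : PySem.Set.ofList (pre ++ [x]) = PySem.Set.ofList pre := by
        rw [← hadd]
        simp [PySem.Set.add, PySem.Set.mem_ofList, hx]
      have := ih (pre ++ [x]) res (by simpa using hL)
      rw [hlen, hofl] at this
      exact this
    · have hc : ¬ (PySem.Set.contains (PySem.Set.ofList pre) x = true) := by
        simp [PySem.Set.mem_ofList, hx]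
      have hidx : PySem.List.index? L x = some pre.length := by
        rw [hL]; exact pv_index?_concat_of_not_mem x pre suf' hx
      have hcond : (PySem.List.index? L x).map (fun k => (k : Int)) = some ((pre.length : Int), x).1 := by
        rw [hidx]; rfl
      rw [show List.filterMap
            (fun p => if (PySem.List.index? L p.2).map (fun k => (k : Int)) = some p.1 then some p.1 else none)
            (((pre.length : Int), x) :: PySem.List.enumerate suf' ((pre.length : Int) + 1))
          = (pre.length : Int) :: List.filterMap
            (fun p => if (PySem.List.index? L p.2).map (fun k => (k : Int)) = some p.1 then some p.1 else none)
            (PySem.List.enumerate suf' ((pre.length : Int) + 1)) from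
        List.filterMap_cons_some (by exact if_pos hcond)]
      rw [show uniqueIndexesLoop (PySem.Set.ofList pre) res (pre.length : Int) (x :: suf')
            = uniqueIndexesLoop (PySem.Set.add (PySem.Set.ofList pre) x)
                (res ++ [(pre.length : Int)]) ((pre.length : Int) + 1) suf' from by
        rw [uniqueIndexesLoop, if_pos hc]]
      rw [hadd]
      have := ih (pre ++ [x]) (res ++ [(pre.length : Int)]) (by simpa using hL)
      rw [hlen] at this
      rw [this, List.append_assoc]
      rfl

-- membership characterization of A's result
theorem pv_mem_A (l : List Int) (j : Int) :
    j ∈ uniqueIndexes l ↔ ∃ n ∈ l, (PySem.List.index? l n).map (fun k => (k : Int)) = some j := by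
  have hA : uniqueIndexes l
      = (PySem.List.enumerate l 0).filterMap
          (fun p => if (PySem.List.index? l p.2).map (fun k => (k : Int)) = some p.1 then some p.1 else none) := by
    have := pv_main l l [] [] rfl
    simpa [uniqueIndexes, PySem.Set.ofList] using this
  rw [hA, List.mem_filterMap]
  constructor
  · rintro ⟨p, hp, hg⟩
    obtain ⟨k, hk, hpk⟩ := (PySem.List.mem_enumerate_iff _ _ _).mp hp
    subst hpk
    split_ifs at hg with hcond
    · exact ⟨l[k], List.getElem_mem hk, (Option.some.inj hg) ▸ hcond⟩
  · rintro ⟨n, hn, hidx⟩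
    obtain ⟨k, hk⟩ := Option.isSome_iff_exists.mp ((PySem.List.index?_isSome_iff l n).mpr hn)
    obtain ⟨hklt, hget, -⟩ := PySem.List.getElem_of_index?_eq_some hk
    rw [hk] at hidx
    have hj : j = (k : Int) := by simpa using hidx.symm
    refine ⟨((k : Int), l[k]), (PySem.List.mem_enumerate_iff _ _ _).mpr ⟨k, hklt, by simp⟩, ?_⟩
    rw [hget, hk, hj]
    simp

-- ===== VERDICT (by name: the statement is the Claim_ definition above) =====
theorem uniqueIndexes_spec : Claim_equal_uniqueIndexes := by
  intro l _
  unfold Spec_uniqueIndexes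
  show uniqueIndexes l = uniqueIndexes_alt l
  have hnd : (pvBuild (PySem.List.enumerate l 0)).keys.Nodup := pv_nodup_keys_build _
  have hvals : (pvBuild (PySem.List.enumerate l 0)).values
      = (pvBuild (PySem.List.enumerate l 0)).keys.map
          (fun n => (pvBuild (PySem.List.enumerate l 0)).getD n 0) :=
    PySem.Dict.values_eq_map_keys _ hnd 0
  -- getD on a key = first index
  have hgetD : ∀ n ∈ l, ∃ k : Nat, PySem.List.index? l n = some k ∧
      (pvBuild (PySem.List.enumerate l 0)).getD n 0 = (k : Int) := by
    intro n hn
    obtain ⟨k, hk⟩ := Option.isSome_iff_exists.mp ((PySem.List.index?_isSome_iff l n).mpr hn)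
    refine ⟨k, hk, ?_⟩
    have := pv_get?_build l 0 n
    rw [hk] at this
    rw [PySem.Dict.getD_eq_get?_getD, this]
    simp
  -- membership of B's values
  have hmemV : ∀ j : Int, j ∈ (pvBuild (PySem.List.enumerate l 0)).values
      ↔ ∃ n ∈ l, (PySem.List.index? l n).map (fun k => (k : Int)) = some j := by
    intro j
    rw [hvals, List.mem_map]
    constructor
    · rintro ⟨n, hn, hj⟩
      have hnl : n ∈ l := (pv_mem_keys_build l n).mp hn
      obtain ⟨k, hk, hD⟩ := hgetD n hnl
      exact ⟨n, hnl, by rw [hk]; simp [← hj, hD]⟩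
    · rintro ⟨n, hn, hidx⟩
      obtain ⟨k, hk, hD⟩ := hgetD n hn
      rw [hk] at hidx
      exact ⟨n, (pv_mem_keys_build l n).mpr hn, by rw [hD]; simpa using hidx⟩
  -- A's result is strictly increasing
  have hAp : (uniqueIndexes l).Pairwise (· < ·) := by
    obtain ⟨t, ht, hp, -⟩ := pv_loop_bounds l PySem.Set.empty [] 0
    unfold uniqueIndexes
    rw [ht]
    simpa using hp
  -- values of B's dict are nodup
  have hVnd : (pvBuild (PySem.List.enumerate l 0)).values.Nodup := by
    rw [hvals]
    refine List.Nodup.map_on ?_ hnd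
    intro x hx y hy hxy
    obtain ⟨kx, hkx, hDx⟩ := hgetD x ((pv_mem_keys_build l x).mp hx)
    obtain ⟨ky, hky, hDy⟩ := hgetD y ((pv_mem_keys_build l y).mp hy)
    rw [hDx, hDy] at hxy
    have hkk : kx = ky := by exact_mod_cast hxy
    obtain ⟨hltx, hgx, -⟩ := PySem.List.getElem_of_index?_eq_some hkx
    obtain ⟨hlty, hgy, -⟩ := PySem.List.getElem_of_index?_eq_some hky
    subst hkk
    rw [← hgx, ← hgy]
  -- A's result is a permutation of B's values
  have hperm : (uniqueIndexes l).Perm (pvBuild (PySem.List.enumerate l 0)).values := by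
    rw [List.perm_ext_iff_of_nodup hAp.nodup hVnd]
    intro j
    rw [pv_mem_A, hmemV]
  -- conclude via: sorted(xs) = any strictly increasing permutation of xs
  have := PySem.List.sorted_eq_of_perm_of_pairwise_lt
    (xs := (pvBuild (PySem.List.enumerate l 0)).values)
    (ys := uniqueIndexes l) (key := fun x => x) hperm hAp
  unfold uniqueIndexes_alt
  rw [← this]
  rfl
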